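-- pv_equiv track=rewrite | github.com/anthonyw298/Test | hi.py | has_hoagie
-- ===== SOURCE A (Python) =====
-- def has_hoagie(num):
--     """
--         >>> has_hoagie(737)
--         True
--         >>> has_hoagie(35)
--         False
--         >>> has_hoagie(-6060)
--         True
--         >>> has_hoagie(-111)
--         True
--         >>> has_hoagie(6945)
--         False
--     """
--     if num<0:                       #changes number to positive
--         num=-num
--     else:
--         pass
--     num2=num//10                    #new number for even place values
--     while num>0 and num//100>0:     # iterates through odd place values to find a sandwich
--         if num%10==(num//100)%10:
--             return True
--         else:
--             num=num//100
--     while num2>0 and num2//100>0:           #iterates through even place values to find a sandwich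
--         if num2%10==(num2//100)%10:
--             return True
--         else:
--             num2=num2//100
--     return False
-- ===== SOURCE B (Python) =====
-- def has_hoagie(num):
--     n = -num if num < 0 else num
--     digits = []
--     while n > 0:
--         digits.append(n % 10)
--         n //= 10
--     return any(a == b for a, b in zip(digits, digits[2:]))
-- ===== Notes on version B (the rewrite author's own statement) =====
-- stated objective: simpler
-- what changed: A interleaves two arithmetic stepping loops (odd-position and even-position digit pairs advanced by //100); B extracts the digit list once and does one linear zip scan comparing each digit to the one two places later.
import Mathlib
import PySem

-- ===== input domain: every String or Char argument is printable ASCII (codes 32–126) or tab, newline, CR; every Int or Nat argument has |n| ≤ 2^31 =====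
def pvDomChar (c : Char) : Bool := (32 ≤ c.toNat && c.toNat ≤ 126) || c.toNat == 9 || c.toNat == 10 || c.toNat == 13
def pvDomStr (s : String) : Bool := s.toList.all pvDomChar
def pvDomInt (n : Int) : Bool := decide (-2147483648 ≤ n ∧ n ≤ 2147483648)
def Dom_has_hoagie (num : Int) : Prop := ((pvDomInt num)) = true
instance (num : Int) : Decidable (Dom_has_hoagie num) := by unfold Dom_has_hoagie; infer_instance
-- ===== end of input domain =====

-- B replaces A's two interleaved arithmetic stepping loops (odd/even digit positions,
-- advancing by //100) by one digit-list extraction plus a single zip scan; objective: simpler.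

-- ===== PORT A =====
-- one of A's while loops: 'while n>0 and n//100>0: if n%10==(n//100)%10: return True else: n=n//100'
def pvLoopA (n : Int) : Bool :=
  if _h : n > 0 ∧ PySem.Int.floordiv n 100 > 0 then
    if PySem.Int.mod n 10 = PySem.Int.mod (PySem.Int.floordiv n 100) 10 then true
    else pvLoopA (PySem.Int.floordiv n 100)
  else false
termination_by n.toNat
decreasing_by
  rw [PySem.Int.floordiv_eq_ediv_of_pos (by norm_num : (0:Int) < 100)] at *
  omega

def has_hoagie (num : Int) : Bool :=
  let n := if num < 0 then -num else num
  let num2 := PySem.Int.floordiv n 10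
  pvLoopA n || pvLoopA num2

-- ===== PORT B =====
-- the digit list built by B's while loop (least significant first)
def pvDigitsB (n : Int) : List Int :=
  if _h : n > 0 then PySem.Int.mod n 10 :: pvDigitsB (PySem.Int.floordiv n 10) else []
termination_by n.toNat
decreasing_by
  rw [PySem.Int.floordiv_eq_ediv_of_pos (by norm_num : (0:Int) < 10)] at *
  omega

def has_hoagie_alt (num : Int) : Bool :=
  let ds := pvDigitsB (if num < 0 then -num else num)
  (ds.zip (ds.drop 2)).any fun p => p.1 == p.2

-- ===== PRECONDITION & SPEC =====
def Spec_has_hoagie (num : Int) (out : Bool) : Prop := out = has_hoagie_alt num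
instance (num : Int) (out : Bool) : Decidable (Spec_has_hoagie num out) := by unfold Spec_has_hoagie; infer_instance

-- ===== CLAIM (what is proved, stated in full; the proofs are below) =====
def Claim_equal_has_hoagie : Prop := ∀ (num : Int), Dom_has_hoagie num → Spec_has_hoagie num (has_hoagie num)

-- ===== LEMMAS AND PROOFS =====

theorem pvFd10 (a : Int) : PySem.Int.floordiv a 10 = a / 10 :=
  PySem.Int.floordiv_eq_ediv_of_pos (by norm_num)
theorem pvFd100 (a : Int) : PySem.Int.floordiv a 100 = a / 100 :=
  PySem.Int.floordiv_eq_ediv_of_pos (by norm_num)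
theorem pvMod10 (a : Int) : PySem.Int.mod a 10 = a % 10 :=
  PySem.Int.mod_eq_emod_of_pos (by norm_num)

-- equation lemmas in Int.ediv/emod form
theorem pvDigitsB_eq (n : Int) :
    pvDigitsB n = if 0 < n then n % 10 :: pvDigitsB (n / 10) else [] := by
  rw [pvDigitsB]
  simp only [pvFd10, pvMod10, dite_eq_ite, gt_iff_lt]

theorem pvLoopA_eq (n : Int) :
    pvLoopA n = if 0 < n ∧ 0 < n / 100 then
      (if n % 10 = n / 100 % 10 then true else pvLoopA (n / 100)) else false := by
  rw [pvLoopA]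
  simp only [pvFd100, pvMod10, dite_eq_ite, gt_iff_lt]

-- A's loop seen on the digit list: compares positions 0 and 2, then advances two digits
def pvSkip : List Int → Bool
  | a :: _ :: c :: r => (a == c) || pvSkip (c :: r)
  | _ => false

theorem pvDigits_tail (n : Int) (hn : 0 ≤ n) :
    pvDigitsB (n / 10) = (pvDigitsB n).tail := by
  by_cases h1 : 0 < n
  · rw [pvDigitsB_eq n, if_pos h1, List.tail_cons]
  · have h0 : n = 0 := by omega
    subst h0
    have e : pvDigitsB 0 = [] := by rw [pvDigitsB_eq]; norm_num
    rw [show (0:Int) / 10 = 0 from by norm_num, e]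
    rfl

theorem pvLoopA_eq_skip (n : Int) (hn : 0 ≤ n) : pvLoopA n = pvSkip (pvDigitsB n) := by
  by_cases hb : 100 ≤ n
  · have hq10 : 0 < n / 10 := by omega
    have hq100 : 0 < n / 100 := by omega
    have hdd : n / 10 / 10 = n / 100 := by omega
    have hfold : pvDigitsB (n / 100) = n / 100 % 10 :: pvDigitsB (n / 100 / 10) := by
      rw [pvDigitsB_eq, if_pos hq100]
    have IH := pvLoopA_eq_skip (n / 100) (by omega)
    rw [pvLoopA_eq, if_pos ⟨by omega, hq100⟩]
    conv_rhs => rw [pvDigitsB_eq, if_pos (by omega : (0:Int) < n),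
      pvDigitsB_eq, if_pos hq10, hdd, hfold]
    rw [pvSkip, ← hfold, ← IH]
    by_cases hc : n % 10 = n / 100 % 10
    · simp [hc]
    · simp [hc]
  · rw [pvLoopA_eq, if_neg (by omega)]
    by_cases h1 : 0 < n
    · by_cases h2 : 0 < n / 10
      · rw [pvDigitsB_eq, if_pos h1, pvDigitsB_eq, if_pos h2,
          pvDigitsB_eq, if_neg (by omega : ¬ (0:Int) < n / 10 / 10)]
        simp [pvSkip]
      · rw [pvDigitsB_eq, if_pos h1, pvDigitsB_eq, if_neg h2]
        simp [pvSkip]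
    · rw [pvDigitsB_eq, if_neg h1]
      simp [pvSkip]
termination_by n.toNat
decreasing_by omega

theorem pvZip_eq (l : List Int) :
    ((l.zip (l.drop 2)).any fun p => p.1 == p.2) = (pvSkip l || pvSkip l.tail) := by
  match l with
  | [] => simp [pvSkip]
  | [a] => simp [pvSkip]
  | [a, b] => simp [pvSkip]
  | a :: b :: c :: r =>
    have IH := pvZip_eq (b :: c :: r)
    simp only [List.drop_succ_cons, List.drop_zero, List.zip_cons_cons, List.any_cons,
      List.tail_cons] at IH ⊢
    rw [IH, pvSkip]
    cases (a == c) <;> cases pvSkip (c :: r) <;> cases pvSkip (b :: c :: r) <;> simp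

-- ===== VERDICT (by name: the statement is the Claim_ definition above) =====
theorem has_hoagie_spec : Claim_equal_has_hoagie := by
  intro num _
  unfold Spec_has_hoagie has_hoagie has_hoagie_alt
  show (pvLoopA (if num < 0 then -num else num) ||
      pvLoopA (PySem.Int.floordiv (if num < 0 then -num else num) 10)) =
    ((pvDigitsB (if num < 0 then -num else num)).zip
      ((pvDigitsB (if num < 0 then -num else num)).drop 2)).any fun p => p.1 == p.2
  set m : Int := if num < 0 then -num else num with hm
  have hm0 : 0 ≤ m := by rw [hm]; split <;> omega
  rw [pvFd10, pvZip_eq, pvLoopA_eq_skip m hm0, pvLoopA_eq_skip (m / 10) (by omega),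
    pvDigits_tail m hm0]
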